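-- pv_equiv track=rewrite | github.com/LYXFOREVER/my_android_world | task_goal_gen/process_mctstree_util.py | find_index_of_third_duplicate
-- ===== SOURCE A (Python) =====
-- def dict_to_tuple(d):
--     # 将字典转换为排序后的元组，确保字典的值也是可哈希的
--     return tuple(sorted((k, tuple(v) if isinstance(v, list) else v) for k, v in d.items()))
--
-- def find_index_of_third_duplicate(list_of_lists):
--     # 找到列表中重复出现第3次的元素，返回其index
--     seen = {}  # 用于记录每个子列表的出现次数
--     for index, current_list in enumerate(list_of_lists):
--         # 将当前子列表转换为不可变的元组（因为列表不能作为字典的键）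
--         # 这里需要将子列表中的字典也转换为元组
--         list_tuple = tuple(dict_to_tuple(d) for d in current_list)
--
--         # 检查当前子列表是否与之前的子列表重复
--         if list_tuple in seen:
--             seen[list_tuple] += 1
--             # 如果某个子列表重复了2次，返回当前索引
--             if seen[list_tuple] == 2:
--                 return index
--         else:
--             seen[list_tuple] = 1
--     # 如果没有找到重复3次的子列表，返回 -1
--     return -1
-- ===== SOURCE B (Python) =====
-- def dict_to_tuple(d):
--     # 将字典转换为排序后的元组，确保字典的值也是可哈希的
--     return tuple(sorted((k, tuple(v) if isinstance(v, list) else v) for k, v in d.items()))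
--
-- def find_index_of_third_duplicate(list_of_lists):
--     # Build the full occurrence table first, then take the smallest second-occurrence index.
--     table = {}
--     for index, current_list in enumerate(list_of_lists):
--         key = tuple(dict_to_tuple(d) for d in current_list)
--         table.setdefault(key, []).append(index)
--     seconds = [idxs[1] for idxs in table.values() if len(idxs) >= 2]
--     return min(seconds) if seconds else -1
-- ===== Notes on version B (the rewrite author's own statement) =====
-- stated objective: alternative
-- what changed: Replaces A's single early-exit pass with a counter dict by building the full key->occurrence-indices table in one pass and then reducing it to the minimum second-occurrence index (falling back to -1).
import Mathlib
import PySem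

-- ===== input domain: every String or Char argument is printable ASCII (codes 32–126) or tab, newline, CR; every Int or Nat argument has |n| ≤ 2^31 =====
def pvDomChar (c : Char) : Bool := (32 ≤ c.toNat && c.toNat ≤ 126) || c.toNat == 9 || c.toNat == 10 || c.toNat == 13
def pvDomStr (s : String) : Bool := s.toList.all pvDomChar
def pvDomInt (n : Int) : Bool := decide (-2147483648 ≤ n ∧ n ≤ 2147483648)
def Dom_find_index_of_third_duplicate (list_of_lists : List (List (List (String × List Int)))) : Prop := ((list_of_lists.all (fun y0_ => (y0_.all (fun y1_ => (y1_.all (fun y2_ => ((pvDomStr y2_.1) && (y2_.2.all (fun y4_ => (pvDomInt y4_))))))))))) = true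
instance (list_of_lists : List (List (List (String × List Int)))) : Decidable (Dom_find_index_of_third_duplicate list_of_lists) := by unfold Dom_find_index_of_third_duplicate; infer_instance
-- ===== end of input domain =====

-- B changes the shape, not the speed: instead of A's early-exit counting scan it builds the
-- full occurrence table and then reduces it to the smallest second-occurrence index ("alternative").

-- ===== PORT A =====
-- shared helper: Python's dict_to_tuple(d) = tuple(sorted((k, tuple(v)) for k, v in d.items()))
def dict_to_tuple (d : List (String × List Int)) : List (String × List Int) :=
  PySem.List.sorted2 d (fun p => p.1) (fun p => p.2) false

-- A's loop: seen-counter dict, early return at the first key reaching count 2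
def goA (seen : PySem.Dict (List (List (String × List Int))) Int) (i : Int) :
    List (List (List (String × List Int))) → Int
  | [] => -1
  | cur :: rest =>
    let t := cur.map dict_to_tuple
    match seen.get? t with
    | some c => if c + 1 == 2 then i else goA (seen.insert t (c + 1)) (i + 1) rest
    | none => goA (seen.insert t 1) (i + 1) rest

def find_index_of_third_duplicate (list_of_lists : List (List (List (String × List Int)))) : Int :=
  goA PySem.Dict.empty 0 list_of_lists

-- ===== PORT B =====
-- the (key, index) pairs of Source B's enumerate loop
def enumKeys (i : Int) : List (List (List (String × List Int))) → List ((List (List (String × List Int))) × Int)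
  | [] => []
  | cur :: rest => (cur.map dict_to_tuple, i) :: enumKeys (i + 1) rest

def find_index_of_third_duplicate_alt (list_of_lists : List (List (List (String × List Int)))) : Int :=
  let table := (enumKeys 0 list_of_lists).foldl
    (fun d p => d.modify p.1 [] (fun l => l ++ [p.2])) PySem.Dict.empty
  let seconds := (table.values.filter (fun idxs => 2 ≤ idxs.length)).map
    (fun idxs => PySem.List.pyGetD idxs 1 0)
  match PySem.List.min? seconds (fun x => x) with
  | some m => m
  | none => -1

-- ===== PRECONDITION & SPEC =====
def Spec_find_index_of_third_duplicate (list_of_lists : List (List (List (String × List Int)))) (out : Int) : Prop := out = find_index_of_third_duplicate_alt list_of_lists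
instance (list_of_lists : List (List (List (String × List Int)))) (out : Int) : Decidable (Spec_find_index_of_third_duplicate list_of_lists out) := by unfold Spec_find_index_of_third_duplicate; infer_instance

-- ===== CLAIM (what is proved, stated in full; the proofs are below) =====
def Claim_equal_find_index_of_third_duplicate : Prop := ∀ (list_of_lists : List (List (List (String × List Int)))), Dom_find_index_of_third_duplicate list_of_lists → Spec_find_index_of_third_duplicate list_of_lists (find_index_of_third_duplicate list_of_lists)

-- ===== LEMMAS AND PROOFS =====

-- abstract key type: everything below is about the list of keys
-- goMem: A's scan with the dict replaced by its key set (list with membership)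
def goMem (seen : List (List (List (String × List Int)))) (i : Int) :
    List (List (List (String × List Int))) → Int
  | [] => -1
  | k :: t => if k ∈ seen then i else goMem (seen ++ [k]) (i + 1) t

-- (key, index) pairs of an abstract key list
def pairsFrom (i : Int) : List (List (List (String × List Int))) → List ((List (List (String × List Int))) × Int)
  | [] => []
  | k :: t => (k, i) :: pairsFrom (i + 1) t

-- occurrence-index list of key c in ks, indices starting at i
def occFrom (i : Int) (ks : List (List (List (String × List Int)))) (c : List (List (String × List Int))) : List Int :=
  ((pairsFrom i ks).filter (fun p => p.1 == c)).map (fun p => p.2)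

-- B's value computed from an abstract key list
def bVal (ks : List (List (List (String × List Int)))) : Int :=
  let table := (pairsFrom 0 ks).foldl
    (fun d p => d.modify p.1 [] (fun l => l ++ [p.2])) PySem.Dict.empty
  let seconds := (table.values.filter (fun idxs => 2 ≤ idxs.length)).map
    (fun idxs => PySem.List.pyGetD idxs 1 0)
  match PySem.List.min? seconds (fun x => x) with
  | some m => m
  | none => -1

theorem enumKeys_eq_pairsFrom (l : List (List (List (String × List Int)))) (i : Int) :
    enumKeys i l = pairsFrom i (l.map (fun cur => cur.map dict_to_tuple)) := by
  induction l generalizing i with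
  | nil => rfl
  | cons cur rest ih => simp [enumKeys, pairsFrom, ih]

theorem alt_eq_bVal (l : List (List (List (String × List Int)))) :
    find_index_of_third_duplicate_alt l = bVal (l.map (fun cur => cur.map dict_to_tuple)) := by
  simp [find_index_of_third_duplicate_alt, bVal, enumKeys_eq_pairsFrom]

theorem pairsFrom_map_fst (i : Int) (ks : List (List (List (String × List Int)))) :
    (pairsFrom i ks).map (fun p => p.1) = ks := by
  induction ks generalizing i with
  | nil => rfl
  | cons k t ih => simp [pairsFrom, ih]

theorem pairsFrom_append (i : Int) (xs ys : List (List (List (String × List Int)))) :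
    pairsFrom i (xs ++ ys) = pairsFrom i xs ++ pairsFrom (i + xs.length) ys := by
  induction xs generalizing i with
  | nil => simp [pairsFrom]
  | cons k t ih =>
    simp [pairsFrom, ih]
    congr 1
    omega

theorem occFrom_append (i : Int) (xs ys : List (List (List (String × List Int)))) (c : List (List (String × List Int))) :
    occFrom i (xs ++ ys) c = occFrom i xs c ++ occFrom (i + xs.length) ys c := by
  simp [occFrom, pairsFrom_append]

theorem occFrom_cons_self (i : Int) (t : List (List (List (String × List Int)))) (c : List (List (String × List Int))) :
    occFrom i (c :: t) c = i :: occFrom (i + 1) t c := by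
  simp [occFrom, pairsFrom]

theorem length_occFrom (i : Int) (ks : List (List (List (String × List Int)))) (c : List (List (String × List Int))) :
    (occFrom i ks c).length = ks.count c := by
  induction ks generalizing i with
  | nil => rfl
  | cons k t ih =>
    by_cases h : k = c
    · simp [occFrom, pairsFrom, List.count_cons, h, ← ih (i + 1)]
    · simp [occFrom, pairsFrom, List.count_cons, h, ← ih (i + 1)]

theorem mem_occFrom_le (i : Int) (ks : List (List (List (String × List Int)))) (c : List (List (String × List Int))) (x : Int)
    (hx : x ∈ occFrom i ks c) : i ≤ x := by
  induction ks generalizing i with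
  | nil => simp [occFrom, pairsFrom] at hx
  | cons k t ih =>
    by_cases h : k = c
    · rw [h, occFrom_cons_self] at hx
      rcases List.mem_cons.mp hx with h1 | h1
      · omega
      · have := ih (i + 1) h1; omega
    · have hx' : x ∈ occFrom (i + 1) t c := by
        simpa [occFrom, pairsFrom, List.filter_cons, h] using hx
      have := ih (i + 1) hx'; omega

-- the table's getD/keys/values, via the PySem grouping lemmas
theorem table_getD (ks : List (List (List (String × List Int)))) (c : List (List (String × List Int))) :
    ((pairsFrom 0 ks).foldl (fun d p => d.modify p.1 [] (fun l => l ++ [p.2])) PySem.Dict.empty).getD c []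
      = occFrom 0 ks c := by
  rw [PySem.Dict.getD_foldl_modify_append]
  simp [occFrom, PySem.Dict.getD_empty]

theorem table_keys (ks : List (List (List (String × List Int)))) :
    ((pairsFrom 0 ks).foldl (fun d p => d.modify p.1 [] (fun l => l ++ [p.2])) PySem.Dict.empty).keys
      = PySem.Set.ofList ks := by
  rw [PySem.Dict.keys_foldl_modify_key (pairsFrom 0 ks) (fun p => p.1) [] (fun _ p l => l ++ [p.2])
    PySem.Dict.empty]
  rw [pairsFrom_map_fst]
  simp [PySem.Dict.keys_empty, PySem.Set.update_nil_left]

theorem table_nodup (ks : List (List (List (String × List Int)))) :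
    ((pairsFrom 0 ks).foldl (fun d p => d.modify p.1 [] (fun l => l ++ [p.2])) PySem.Dict.empty).keys.Nodup :=
  PySem.Dict.nodup_keys_foldl_modify_key (pairsFrom 0 ks) (fun p => p.1) [] (fun _ p l => l ++ [p.2])
    PySem.Dict.empty PySem.Dict.nodup_keys_empty

-- B's seconds list over an abstract key list
def secondsOf (ks : List (List (List (String × List Int)))) : List Int :=
  (((PySem.Set.ofList ks).map (fun c => occFrom 0 ks c)).filter (fun idxs => 2 ≤ idxs.length)).map
    (fun idxs => PySem.List.pyGetD idxs 1 0)

theorem bVal_eq (ks : List (List (List (String × List Int)))) :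
    bVal ks = match PySem.List.min? (secondsOf ks) (fun x => x) with
      | some m => m
      | none => -1 := by
  show (let table := (pairsFrom 0 ks).foldl (fun d p => d.modify p.1 [] (fun l => l ++ [p.2])) PySem.Dict.empty
    let seconds := (table.values.filter (fun idxs => 2 ≤ idxs.length)).map (fun idxs => PySem.List.pyGetD idxs 1 0)
    match PySem.List.min? seconds (fun x => x) with
      | some m => m
      | none => -1) = _
  simp only
  rw [PySem.Dict.values_eq_map_keys _ (table_nodup ks) [], table_keys ks]
  simp only [table_getD]
  rfl

theorem bVal_nodup (ks : List (List (List (String × List Int)))) (h : ks.Nodup) : bVal ks = -1 := by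
  rw [bVal_eq]
  have hsec : secondsOf ks = [] := by
    unfold secondsOf
    have : ((PySem.Set.ofList ks).map (fun c => occFrom 0 ks c)).filter (fun idxs => 2 ≤ idxs.length) = [] := by
      rw [List.filter_eq_nil_iff]
      intro a ha
      obtain ⟨c, _, rfl⟩ := List.mem_map.mp ha
      have := List.nodup_iff_count_le_one.mp h c
      simp only [decide_eq_true_eq]
      rw [length_occFrom]
      omega
    rw [this, List.map_nil]
  rw [hsec]
  rfl

theorem bVal_repeat (pre t : List (List (List (String × List Int)))) (k : List (List (String × List Int)))
    (hnd : pre.Nodup) (hk : k ∈ pre) : bVal (pre ++ k :: t) = (pre.length : Int) := by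
  rw [bVal_eq]
  set n : Int := (pre.length : Int) with hn
  have hsplit : ∀ c, occFrom 0 (pre ++ k :: t) c = occFrom 0 pre c ++ occFrom n (k :: t) c := by
    intro c
    rw [occFrom_append]
    simp [hn]
  -- n is in seconds
  have hcnt : pre.count k = 1 :=
    le_antisymm (List.nodup_iff_count_le_one.mp hnd k) (List.count_pos_iff.mpr hk)
  have hlen1 : (occFrom 0 pre k).length = 1 := by rw [length_occFrom, hcnt]
  obtain ⟨j, hj⟩ := List.length_eq_one_iff.mp hlen1
  have hocck : occFrom 0 (pre ++ k :: t) k = j :: n :: occFrom (n + 1) t k := by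
    rw [hsplit k, hj, occFrom_cons_self]
    rfl
  have hnmem : n ∈ secondsOf (pre ++ k :: t) := by
    unfold secondsOf
    refine List.mem_map.mpr ⟨occFrom 0 (pre ++ k :: t) k, ?_, ?_⟩
    · refine List.mem_filter.mpr ⟨List.mem_map.mpr ⟨k, ?_, rfl⟩, ?_⟩
      · simp [PySem.Set.mem_ofList]
      · rw [hocck]; simp
    · rw [hocck, show (1 : Int) = ((1 : Nat) : Int) from rfl,
        PySem.List.pyGetD_ofNat _ 1 0 (by simp)]
      rfl
  -- every element of seconds is ≥ n
  have hbound : ∀ s ∈ secondsOf (pre ++ k :: t), n ≤ s := by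
    intro s hs
    obtain ⟨l, hlf, rfl⟩ := List.mem_map.mp hs
    obtain ⟨hlm, hlen⟩ := List.mem_filter.mp hlf
    obtain ⟨c, _, rfl⟩ := List.mem_map.mp hlm
    simp only [decide_eq_true_eq] at hlen
    have h1 : (occFrom 0 pre c).length ≤ 1 := by
      rw [length_occFrom]; exact List.nodup_iff_count_le_one.mp hnd c
    rw [hsplit c] at hlen ⊢
    cases hA : occFrom 0 pre c with
    | nil =>
      rw [hA] at hlen
      simp only [List.nil_append] at hlen ⊢
      cases hB : occFrom n (k :: t) c with
      | nil => rw [hB] at hlen; simp at hlen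
      | cons x r =>
        cases r with
        | nil => rw [hB] at hlen; simp at hlen
        | cons y r' =>
          rw [show (1 : Int) = ((1 : Nat) : Int) from rfl,
            PySem.List.pyGetD_ofNat _ 1 0 (by simp)]
          exact mem_occFrom_le n (k :: t) c y (by rw [hB]; simp)
    | cons a r =>
      have hr : r = [] := by
        rw [hA] at h1; simp at h1; exact h1
      subst hr
      rw [hA] at hlen
      simp only [List.cons_append, List.nil_append] at hlen ⊢
      cases hB : occFrom n (k :: t) c with
      | nil => rw [hB] at hlen; simp at hlen
      | cons x r' =>
        rw [show (1 : Int) = ((1 : Nat) : Int) from rfl,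
          PySem.List.pyGetD_ofNat _ 1 0 (by simp)]
        exact mem_occFrom_le n (k :: t) c x (by rw [hB]; simp)
  cases hm : PySem.List.min? (secondsOf (pre ++ k :: t)) (fun x => x) with
  | none =>
    rw [(PySem.List.min?_eq_none_iff _ _).mp hm] at hnmem
    simp at hnmem
  | some m =>
    have hmem := PySem.List.min?_mem hm
    have hle : m ≤ n := PySem.List.min?_isMin hm n hnmem
    have hge : n ≤ m := hbound m hmem
    simp only []
    omega

theorem goMem_eq_bVal (t pre : List (List (List (String × List Int)))) (hnd : pre.Nodup) :
    goMem pre (pre.length : Int) t = bVal (pre ++ t) := by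
  induction t generalizing pre with
  | nil => simpa [goMem] using (bVal_nodup pre hnd).symm
  | cons k t ih =>
    by_cases hk : k ∈ pre
    · simp [goMem, hk, bVal_repeat pre t k hnd hk]
    · have h2 : (pre ++ [k]).Nodup := by
        simp only [List.nodup_append, hnd, true_and, List.nodup_singleton, List.mem_singleton]
        exact fun a ha b hb h => hk ((h.trans hb) ▸ ha)
      have hih : goMem (pre ++ [k]) (((pre ++ [k]).length : Int)) t = bVal ((pre ++ [k]) ++ t) :=
        ih (pre ++ [k]) h2
      simp only [List.length_append, List.length_cons, List.length_nil] at hih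
      push_cast at hih
      simpa [goMem, hk, List.append_assoc] using hih

theorem goA_eq_goMem (l : List (List (List (String × List Int))))
    (seen : PySem.Dict (List (List (String × List Int))) Int) (i : Int)
    (hinv : ∀ k v, seen.get? k = some v → v = 1) :
    goA seen i l = goMem seen.keys i (l.map (fun cur => cur.map dict_to_tuple)) := by
  induction l generalizing seen i with
  | nil => simp [goA, goMem]
  | cons cur rest ih =>
    simp only [goA, List.map_cons, goMem]
    cases h : seen.get? (cur.map dict_to_tuple) with
    | some c =>
      have hc : c = 1 := hinv _ _ h
      have hmem : cur.map dict_to_tuple ∈ seen.keys := by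
        have : seen.contains (cur.map dict_to_tuple) = true := by
          rw [PySem.Dict.contains_eq_isSome_get?, h]; rfl
        exact (PySem.Dict.contains_iff_mem_keys _ _).mp this
      simp [hc, hmem]
    | none =>
      have hnc : seen.contains (cur.map dict_to_tuple) = false := by
        rw [PySem.Dict.contains_eq_isSome_get?, h]; rfl
      have hmem : cur.map dict_to_tuple ∉ seen.keys := by
        intro hm
        rw [(PySem.Dict.contains_iff_mem_keys seen _).mpr hm] at hnc
        simp at hnc
      have hinv' : ∀ k v, (seen.insert (cur.map dict_to_tuple) 1).get? k = some v → v = 1 := by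
        intro k v hv
        rw [PySem.Dict.get?_insert] at hv
        split at hv
        · exact (Option.some.inj hv).symm
        · exact hinv _ _ hv
      rw [if_neg hmem]
      exact (ih (seen.insert (cur.map dict_to_tuple) 1) (i + 1) hinv').trans
        (by rw [PySem.Dict.keys_insert_of_not_contains seen 1 hnc])

-- ===== VERDICT (by name: the statement is the Claim_ definition above) =====
theorem find_index_of_third_duplicate_spec : Claim_equal_find_index_of_third_duplicate := by
  intro l _
  unfold Spec_find_index_of_third_duplicate
  have hA : find_index_of_third_duplicate l
      = goMem [] 0 (l.map (fun cur => cur.map dict_to_tuple)) := by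
    simpa [find_index_of_third_duplicate, PySem.Dict.keys] using
      goA_eq_goMem l PySem.Dict.empty 0 (by intro k v h; simp [PySem.Dict.get?_empty] at h)
  have hB := alt_eq_bVal l
  have hm := goMem_eq_bVal (l.map (fun cur => cur.map dict_to_tuple)) [] (by simp)
  simp only [List.length_nil, Int.natCast_zero, List.nil_append] at hm
  rw [hA, hB, hm]
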